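-- pv_equiv track=rewrite | github.com/elysiaxx/gsm-backend | utils/util.py | merge_dicts_by_timestamp
-- ===== SOURCE A (Python) =====
-- from collections import defaultdict
--
-- def merge_dicts_by_timestamp(arr, timestamp_key):
--     merged_dict = defaultdict(int)
--
--     for dictionary in arr:
--         timestamp_value = dictionary[timestamp_key]
--         if timestamp_value not in merged_dict:
--             merged_dict[timestamp_value] = dictionary
--         else:
--             merged_dict[timestamp_value] = merge_dicts(merged_dict[timestamp_value], dictionary)
--
--     return list(merged_dict.values())
--
-- def merge_dicts(dict1, dict2):
--     merged_dict = dict1.copy()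
--
--     for key, value in dict2.items():
--         if key in merged_dict:
--             merged_dict[key] += value
--         else:
--             merged_dict[key] = value
--
--     return merged_dict
-- ===== SOURCE B (Python) =====
-- from collections import defaultdict
--
-- def merge_dicts_by_timestamp(arr, timestamp_key):
--     # Group-then-reduce: first bucket the dicts by their timestamp value,
--     # then collapse each bucket into one fresh dict by summing every key.
--     groups = defaultdict(list)
--     for d in arr:
--         groups[d[timestamp_key]].append(d)
--     result = []
--     for ds in groups.values():
--         acc = {}
--         for d in ds:
--             for k, v in d.items():
--                 acc[k] = acc.get(k, 0) + v
--         result.append(acc)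
--     return result
-- ===== Notes on version B (the rewrite author's own statement) =====
-- stated objective: alternative
-- what changed: Replaces A's incremental running-merge fold (merge the new dict into the stored merged dict at each step) with a two-pass group-then-reduce: first bucket the dicts by timestamp value, then collapse each bucket into a fresh dict with acc[k] = acc.get(k,0)+v.
import Mathlib
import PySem

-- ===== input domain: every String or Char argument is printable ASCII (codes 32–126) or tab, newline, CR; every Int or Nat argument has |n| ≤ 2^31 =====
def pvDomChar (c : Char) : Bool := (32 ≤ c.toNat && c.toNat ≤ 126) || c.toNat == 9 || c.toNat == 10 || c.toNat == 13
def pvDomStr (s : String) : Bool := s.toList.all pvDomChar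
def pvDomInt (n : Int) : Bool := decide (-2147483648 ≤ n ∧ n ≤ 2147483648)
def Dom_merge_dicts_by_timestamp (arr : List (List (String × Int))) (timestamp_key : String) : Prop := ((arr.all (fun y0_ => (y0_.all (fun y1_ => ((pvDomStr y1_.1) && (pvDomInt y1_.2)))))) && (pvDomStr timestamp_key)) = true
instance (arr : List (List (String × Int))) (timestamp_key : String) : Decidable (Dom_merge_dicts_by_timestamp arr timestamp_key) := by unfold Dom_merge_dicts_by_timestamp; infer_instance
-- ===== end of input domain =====

-- B replaces A's incremental running-merge fold with a two-pass group-then-reduce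
-- (bucket by timestamp value, then sum every key of each bucket into a fresh dict);
-- same result, different decomposition (objective: alternative).

-- ===== PORT A =====
-- helper merge_dicts of Source A
def merge_dicts (dict1 dict2 : PySem.Dict String Int) : PySem.Dict String Int :=
  dict2.items.foldl
    (fun md kv =>
      if md.contains kv.1 then md.insert kv.1 (md.getD kv.1 0 + kv.2)
      else md.insert kv.1 kv.2)
    dict1

def merge_dicts_by_timestamp (arr : List (List (String × Int))) (timestamp_key : String) : List (List (String × Int)) :=
  -- dictionary[timestamp_key] raises KeyError when absent; Pre_ excludes that, the port reads a default there
  ((arr.foldl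
      (fun md d =>
        let dd := PySem.Dict.ofList d
        let tv := dd.getD timestamp_key 0
        if md.contains tv then md.insert tv (merge_dicts (md.getD tv PySem.Dict.empty) dd)
        else md.insert tv dd)
      (PySem.Dict.empty : PySem.Dict Int (PySem.Dict String Int))).values).map PySem.Dict.items

-- ===== PORT B =====
-- second pass of Source B: collapse one bucket, summing every key into a fresh dict
def pvReduceGroup (ds : List (PySem.Dict String Int)) : PySem.Dict String Int :=
  ds.foldl
    (fun acc d =>
      d.items.foldl (fun acc kv => acc.insert kv.1 (acc.getD kv.1 0 + kv.2)) acc)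
    PySem.Dict.empty

def merge_dicts_by_timestamp_alt (arr : List (List (String × Int))) (timestamp_key : String) : List (List (String × Int)) :=
  let groups :=
    arr.foldl
      (fun g d =>
        let dd := PySem.Dict.ofList d
        let tv := dd.getD timestamp_key 0
        g.modify tv [] (fun ds => ds ++ [dd]))
      (PySem.Dict.empty : PySem.Dict Int (List (PySem.Dict String Int)))
  (groups.values).map (fun ds => (pvReduceGroup ds).items)

-- ===== PRECONDITION & SPEC =====
-- Pre_ excludes exactly the inputs where some dict lacks timestamp_key: there Python A raises KeyError.
def Pre_merge_dicts_by_timestamp (arr : List (List (String × Int))) (timestamp_key : String) : Prop :=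
  ∀ d ∈ arr, timestamp_key ∈ d.map Prod.fst
instance (arr : List (List (String × Int))) (timestamp_key : String) : Decidable (Pre_merge_dicts_by_timestamp arr timestamp_key) := by unfold Pre_merge_dicts_by_timestamp; infer_instance

def pvWitness_merge_dicts_by_timestamp : (List (List (String × Int))) × String :=
  ([[("t", 1), ("a", 2)], [("t", 1), ("b", 3)], [("t", 2)]], "t")

def Spec_merge_dicts_by_timestamp (arr : List (List (String × Int))) (timestamp_key : String) (out : List (List (String × Int))) : Prop := out = merge_dicts_by_timestamp_alt arr timestamp_key
instance (arr : List (List (String × Int))) (timestamp_key : String) (out : List (List (String × Int))) : Decidable (Spec_merge_dicts_by_timestamp arr timestamp_key out) := by unfold Spec_merge_dicts_by_timestamp; infer_instance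

-- ===== CLAIM (what is proved, stated in full; the proofs are below) =====
def Claim_equal_merge_dicts_by_timestamp : Prop := ∀ (arr : List (List (String × Int))) (timestamp_key : String), Dom_merge_dicts_by_timestamp arr timestamp_key → Pre_merge_dicts_by_timestamp arr timestamp_key → Spec_merge_dicts_by_timestamp arr timestamp_key (merge_dicts_by_timestamp arr timestamp_key)

-- ===== LEMMAS AND PROOFS =====

-- map a function over the values of a dict
def pvMapVal {ν₁ ν₂ : Type} (f : ν₁ → ν₂) (g : PySem.Dict Int ν₁) : PySem.Dict Int ν₂ :=
  PySem.Dict.mk (g.items.map (fun p => (p.1, f p.2)))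

theorem pvMapVal_contains {ν₁ ν₂ : Type} (f : ν₁ → ν₂) (g : PySem.Dict Int ν₁) (k : Int) :
    (pvMapVal f g).contains k = g.contains k := by
  simp [pvMapVal, PySem.Dict.contains, List.any_map, Function.comp_def]

theorem pvMapVal_get? {ν₁ ν₂ : Type} (f : ν₁ → ν₂) (g : PySem.Dict Int ν₁) (k : Int) :
    (pvMapVal f g).get? k = (g.get? k).map f := by
  simp [pvMapVal, PySem.Dict.get?, List.find?_map, Function.comp_def, Option.map_map]

theorem pvMapVal_insert {ν₁ ν₂ : Type} (f : ν₁ → ν₂) (g : PySem.Dict Int ν₁) (k : Int) (v : ν₁) :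
    pvMapVal f (g.insert k v) = (pvMapVal f g).insert k (f v) := by
  simp only [PySem.Dict.insert, pvMapVal_contains]
  by_cases h : g.contains k = true
  · simp only [h, if_true, pvMapVal, List.map_map]
    congr 1
    apply List.map_congr_left
    intro p _
    by_cases hp : p.1 = k <;> simp [hp]
  · simp [h, pvMapVal]

theorem pvMapVal_values {ν₁ ν₂ : Type} (f : ν₁ → ν₂) (g : PySem.Dict Int ν₁) :
    (pvMapVal f g).values = g.values.map f := by
  simp [pvMapVal, PySem.Dict.values, List.map_map, Function.comp_def]

-- merge_dicts is the insert-add fold (absent key: getD gives 0 and 0 + v = v)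
theorem merge_dicts_eq_fold (d1 d2 : PySem.Dict String Int) :
    merge_dicts d1 d2 = d2.items.foldl (fun acc kv => acc.insert kv.1 (acc.getD kv.1 0 + kv.2)) d1 := by
  unfold merge_dicts
  congr 1
  funext acc kv
  by_cases h : acc.contains kv.1
  · simp [h]
  · simp only [h, Bool.false_eq_true, if_false]
    rw [PySem.Dict.getD_of_not_contains _ _ (by simpa using h)]
    norm_num

-- folding insert-add over nodup fresh keys just appends them
theorem fold_insertAdd_fresh (l : List (String × Int)) :
    ∀ acc : PySem.Dict String Int, (l.map Prod.fst).Nodup →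
      (∀ p ∈ l, acc.contains p.1 = false) →
      l.foldl (fun acc kv => acc.insert kv.1 (acc.getD kv.1 0 + kv.2)) acc = PySem.Dict.mk (acc.items ++ l) := by
  induction l with
  | nil => intro acc _ _; simp
  | cons kv t ih =>
    intro acc hnd hfresh
    have hc : acc.contains kv.1 = false := hfresh kv (by simp)
    have hstep : acc.insert kv.1 (acc.getD kv.1 0 + kv.2) = PySem.Dict.mk (acc.items ++ [kv]) := by
      rw [PySem.Dict.getD_of_not_contains _ _ hc]
      simp [PySem.Dict.insert, hc]
    have hnd' : (kv.1 :: t.map Prod.fst).Nodup := by simpa using hnd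
    simp only [List.foldl_cons, hstep]
    rw [ih _ (List.nodup_cons.mp hnd').2 ?_]
    · simp
    · intro p hp
      have h1 : acc.contains p.1 = false := hfresh p (by simp [hp])
      have h2 : p.1 ≠ kv.1 := by
        intro he
        exact (List.nodup_cons.mp hnd').1 (he ▸ List.mem_map_of_mem hp)
      simp [PySem.Dict.contains] at h1 ⊢
      exact ⟨h1, fun he => (h2 he.symm).elim⟩

theorem pvReduceGroup_single (dd : PySem.Dict String Int) (h : dd.keys.Nodup) :
    pvReduceGroup [dd] = dd := by
  unfold pvReduceGroup
  simp only [List.foldl_cons, List.foldl_nil]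
  rw [fold_insertAdd_fresh _ _ (by simpa [PySem.Dict.keys] using h)
        (by intro p _; simp [PySem.Dict.contains, PySem.Dict.empty])]
  simp [PySem.Dict.empty]

-- one step of A's fold on the reduced view equals the reduced view of one step of B's grouping fold
theorem step_eq (timestamp_key : String) (d : List (String × Int))
    (g : PySem.Dict Int (List (PySem.Dict String Int))) :
    (if (pvMapVal pvReduceGroup g).contains ((PySem.Dict.ofList d).getD timestamp_key 0) then
       (pvMapVal pvReduceGroup g).insert ((PySem.Dict.ofList d).getD timestamp_key 0)
         (merge_dicts ((pvMapVal pvReduceGroup g).getD ((PySem.Dict.ofList d).getD timestamp_key 0) PySem.Dict.empty) (PySem.Dict.ofList d))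
     else (pvMapVal pvReduceGroup g).insert ((PySem.Dict.ofList d).getD timestamp_key 0) (PySem.Dict.ofList d))
    = pvMapVal pvReduceGroup
        (g.modify ((PySem.Dict.ofList d).getD timestamp_key 0) [] (fun ds => ds ++ [PySem.Dict.ofList d])) := by
  have hnd : (PySem.Dict.ofList d).keys.Nodup := PySem.Dict.nodup_keys_ofList d
  revert hnd
  generalize PySem.Dict.ofList d = dd
  intro hnd
  generalize dd.getD timestamp_key 0 = tv
  simp only [PySem.Dict.modify, pvMapVal_contains]
  by_cases hc : g.contains tv = true
  · obtain ⟨ds, hds⟩ : ∃ ds, g.get? tv = some ds := by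
      rcases hget : g.get? tv with _ | ds
      · rw [(PySem.Dict.get?_eq_none_iff_contains g tv).mp hget] at hc; exact absurd hc (by simp)
      · exact ⟨ds, rfl⟩
    have hgd : g.getD tv [] = ds := PySem.Dict.getD_of_get?_eq_some _ _ hds
    have hmv : (pvMapVal pvReduceGroup g).getD tv PySem.Dict.empty = pvReduceGroup ds := by
      simp [PySem.Dict.getD_eq_get?_getD, pvMapVal_get?, hds]
    rw [hc, if_pos rfl, hmv, hgd, pvMapVal_insert]
    congr 1
    rw [merge_dicts_eq_fold]
    unfold pvReduceGroup
    rw [List.foldl_append]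
    rfl
  · have hgd : g.getD tv [] = [] :=
      PySem.Dict.getD_of_not_contains _ _ (by simpa using hc)
    simp only [hc, Bool.false_eq_true, if_false, hgd, List.nil_append, pvMapVal_insert]
    rw [pvReduceGroup_single dd (by simpa [PySem.Dict.keys] using hnd)]

theorem main_invariant (arr : List (List (String × Int))) (timestamp_key : String) :
    ∀ g : PySem.Dict Int (List (PySem.Dict String Int)),
      arr.foldl
        (fun md d =>
          let dd := PySem.Dict.ofList d
          let tv := dd.getD timestamp_key 0
          if md.contains tv then md.insert tv (merge_dicts (md.getD tv PySem.Dict.empty) dd)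
          else md.insert tv dd)
        (pvMapVal pvReduceGroup g)
      = pvMapVal pvReduceGroup
          (arr.foldl
            (fun g d =>
              let dd := PySem.Dict.ofList d
              let tv := dd.getD timestamp_key 0
              g.modify tv [] (fun ds => ds ++ [dd]))
            g) := by
  induction arr with
  | nil => intro g; rfl
  | cons d t ih =>
    intro g
    simp only [List.foldl_cons]
    rw [step_eq timestamp_key d g]
    exact ih _

-- ===== VERDICT (by name: the statement is the Claim_ definition above) =====
theorem merge_dicts_by_timestamp_spec : Claim_equal_merge_dicts_by_timestamp := by
  intro arr timestamp_key _ _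
  unfold Spec_merge_dicts_by_timestamp merge_dicts_by_timestamp merge_dicts_by_timestamp_alt
  have h := main_invariant arr timestamp_key PySem.Dict.empty
  have hempty : pvMapVal pvReduceGroup (PySem.Dict.empty : PySem.Dict Int (List (PySem.Dict String Int))) = PySem.Dict.empty := rfl
  rw [hempty] at h
  rw [h, pvMapVal_values, List.map_map]
  rfl
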